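-- pv_equiv track=rewrite | github.com/arbitrium-framework/arbitrium | src/arbitrium/core/comparison.py | _detect_apology_or_refusal
-- ===== SOURCE A (Python) =====
-- def _detect_apology_or_refusal(evaluation_text: str) -> bool:
--     """Detect if the response is an apology or refusal instead of proper evaluation."""
--     if not evaluation_text:
--         return False
--
--     # Convert to lowercase for case-insensitive matching
--     text_lower = evaluation_text.lower().strip()
--
--     # Check if the response starts with common apology/refusal patterns
--     refusal_patterns = [
--         "i cannot",
--         "i can't",
--         "i'm sorry",
--         "i am sorry",
--         "i apologize",
--         "sorry, i",
--         "sorry but",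
--         "i'm unable",
--         "i am unable",
--         "i don't have",
--         "i do not have",
--         "as an ai",
--         "i'm an ai",
--         "i am an ai",
--     ]
--
--     # Check if response starts with refusal (first 200 chars)
--     text_start = text_lower[:200]
--     return any(pattern in text_start for pattern in refusal_patterns)
-- ===== SOURCE B (Python) =====
-- # B: one position-major scan over the 200-char prefix with a first-character
-- # dispatch table, instead of one full substring scan per pattern.
--
-- _BY_FIRST = {
--     "i": (
--         "i cannot",
--         "i can't",
--         "i'm sorry",
--         "i am sorry",
--         "i apologize",
--         "i'm unable",
--         "i am unable",
--         "i don't have",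
--         "i do not have",
--         "i'm an ai",
--         "i am an ai",
--     ),
--     "s": (
--         "sorry, i",
--         "sorry but",
--     ),
--     "a": (
--         "as an ai",
--     ),
-- }
--
--
-- def _detect_apology_or_refusal(evaluation_text: str) -> bool:
--     if not evaluation_text:
--         return False
--     text_start = evaluation_text.lower().strip()[:200]
--     for i, c in enumerate(text_start):
--         for pattern in _BY_FIRST.get(c, ()):
--             if text_start.startswith(pattern, i):
--                 return True
--     return False
-- ===== Notes on version B (the rewrite author's own statement) =====
-- stated objective: alternative
-- what changed: A runs a separate substring scan of the 200-char prefix for each of the 14 patterns; B makes a single position-major pass over the prefix, dispatching at each position through a first-character table ('i'/'s'/'a') and testing startswith only for the few patterns that can begin there.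
import Mathlib
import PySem

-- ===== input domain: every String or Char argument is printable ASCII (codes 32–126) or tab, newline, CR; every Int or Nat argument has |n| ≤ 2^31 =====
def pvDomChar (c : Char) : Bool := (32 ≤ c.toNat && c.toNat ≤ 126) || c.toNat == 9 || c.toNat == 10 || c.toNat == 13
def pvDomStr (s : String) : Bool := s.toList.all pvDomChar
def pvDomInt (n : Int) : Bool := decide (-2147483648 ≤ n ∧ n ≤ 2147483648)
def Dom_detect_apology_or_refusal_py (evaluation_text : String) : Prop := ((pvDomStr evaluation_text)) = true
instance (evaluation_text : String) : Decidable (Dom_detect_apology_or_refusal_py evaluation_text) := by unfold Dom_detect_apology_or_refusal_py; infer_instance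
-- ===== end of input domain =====

-- B replaces A's per-pattern substring scan by one position-major pass over the
-- 200-char prefix with a first-character dispatch table (objective: alternative).


-- ===== PORT A =====
def pvRefusalPatterns : List String :=
  ["i cannot", "i can't", "i'm sorry", "i am sorry", "i apologize",
   "sorry, i", "sorry but", "i'm unable", "i am unable",
   "i don't have", "i do not have", "as an ai", "i'm an ai", "i am an ai"]

def detect_apology_or_refusal_py (evaluation_text : String) : Bool :=
  if evaluation_text.toList = [] then false
  else
    let text_lower := PySem.Str.strip (PySem.Str.lower evaluation_text)
    let text_start := PySem.Str.slice text_lower none (some 200)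
    pvRefusalPatterns.any (fun pattern => PySem.Str.isIn pattern text_start)

-- ===== PORT B =====
-- B's dispatch table _BY_FIRST: the patterns that can start at a given character.
def pvByFirst (c : Char) : List (List Char) :=
  if c = 'i' then
    ["i cannot".toList, "i can't".toList, "i'm sorry".toList, "i am sorry".toList,
     "i apologize".toList, "i'm unable".toList, "i am unable".toList,
     "i don't have".toList, "i do not have".toList, "i'm an ai".toList, "i am an ai".toList]
  else if c = 's' then ["sorry, i".toList, "sorry but".toList]
  else if c = 'a' then ["as an ai".toList]
  else []

-- B's single pass over the positions of the prefix (the enumerate loop).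
def pvScan : List Char → Bool
  | [] => false
  | c :: rest =>
    (pvByFirst c).any (fun p => PySem.Chars.startswith (c :: rest) p) || pvScan rest

def detect_apology_or_refusal_py_alt (evaluation_text : String) : Bool :=
  if evaluation_text.toList = [] then false
  else
    pvScan (PySem.Str.slice (PySem.Str.strip (PySem.Str.lower evaluation_text)) none (some 200)).toList

-- ===== PRECONDITION & SPEC =====
def Spec_detect_apology_or_refusal_py (evaluation_text : String) (out : Bool) : Prop := out = detect_apology_or_refusal_py_alt evaluation_text
instance (evaluation_text : String) (out : Bool) : Decidable (Spec_detect_apology_or_refusal_py evaluation_text out) := by unfold Spec_detect_apology_or_refusal_py; infer_instance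

-- ===== CLAIM (what is proved, stated in full; the proofs are below) =====
def Claim_equal_detect_apology_or_refusal_py : Prop := ∀ (evaluation_text : String), Dom_detect_apology_or_refusal_py evaluation_text → Spec_detect_apology_or_refusal_py evaluation_text (detect_apology_or_refusal_py evaluation_text)

-- ===== LEMMAS AND PROOFS =====

-- every entry of the dispatch table is a pattern whose first character is the key
lemma pvByFirst_sound (c : Char) (q : List Char) (hq : q ∈ pvByFirst c) :
    (∃ p ∈ pvRefusalPatterns, p.toList = q) ∧ q.head? = some c := by
  unfold pvByFirst at hq
  split_ifs at hq with h1 h2 h3 <;> [subst h1; subst h2; subst h3; skip] <;>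
    fin_cases hq <;> exact ⟨by decide, rfl⟩

-- every pattern is in the dispatch-table row of its first character
lemma pvByFirst_complete (p : String) (hp : p ∈ pvRefusalPatterns) (c : Char)
    (hh : p.toList.head? = some c) : p.toList ∈ pvByFirst c := by
  fin_cases hp <;>
    (obtain rfl : c = _ := (Option.some.inj hh).symm; decide)

-- B's scan finds exactly the strings that contain some pattern as a substring
lemma pvScan_iff (s : List Char) :
    pvScan s = true ↔ ∃ p ∈ pvRefusalPatterns, p.toList <:+: s := by
  induction s with
  | nil =>
    refine iff_of_false (by simp [pvScan]) ?_
    rintro ⟨p, hp, hinf⟩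
    have : p.toList = [] := List.eq_nil_of_infix_nil hinf
    revert this
    fin_cases hp <;> decide
  | cons c rest ih =>
    simp only [pvScan, Bool.or_eq_true, List.any_eq_true]
    constructor
    · rintro (⟨q, hq, hsw⟩ | h)
      · obtain ⟨⟨p, hp, rfl⟩, _⟩ := pvByFirst_sound c q hq
        exact ⟨p, hp, ((PySem.Chars.startswith_iff _ _).mp hsw).isInfix⟩
      · obtain ⟨p, hp, hinf⟩ := ih.mp h
        exact ⟨p, hp, List.infix_cons hinf⟩
    · rintro ⟨p, hp, hinf⟩
      rcases List.infix_cons_iff.mp hinf with hpre | hinf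
      · left
        obtain ⟨t, ht⟩ := hpre
        have hne : p.toList ≠ [] := by fin_cases hp <;> decide
        obtain ⟨a, l, hl⟩ := List.exists_cons_of_ne_nil hne
        have hac : a = c := by rw [hl] at ht; exact (List.cons.injEq .. ▸ ht).1
        refine ⟨p.toList, pvByFirst_complete p hp c ?_, (PySem.Chars.startswith_iff _ _).mpr ⟨t, ht⟩⟩
        rw [hl, hac]; rfl
      · exact Or.inr (ih.mpr ⟨p, hp, hinf⟩)

-- the two matchers agree on any prefix string
lemma pvMatch_eq (ts : String) :
    pvRefusalPatterns.any (fun pattern => PySem.Str.isIn pattern ts) = pvScan ts.toList := by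
  rcases h : pvScan ts.toList with _ | _
  · rw [Bool.eq_false_iff]
    intro hc
    obtain ⟨p, hp, hin⟩ := List.any_eq_true.mp hc
    exact absurd ((pvScan_iff ts.toList).mpr
      ⟨p, hp, (PySem.Str.isIn_iff_infix p ts).mp hin⟩) (by simp [h])
  · obtain ⟨p, hp, hinf⟩ := (pvScan_iff ts.toList).mp h
    exact List.any_eq_true.mpr ⟨p, hp, (PySem.Str.isIn_iff_infix p ts).mpr hinf⟩

-- ===== VERDICT (by name: the statement is the Claim_ definition above) =====
theorem detect_apology_or_refusal_py_spec : Claim_equal_detect_apology_or_refusal_py := by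
  intro s _
  unfold Spec_detect_apology_or_refusal_py detect_apology_or_refusal_py detect_apology_or_refusal_py_alt
  split
  · rfl
  · exact pvMatch_eq _
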